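-- pv_equiv track=rewrite | github.com/grambank/pygrambank | src/pygrambank/bib.py | bibkey_authors
-- ===== SOURCE A (Python) =====
-- def bibkey_authors(bibkey):
--     """Generator yielding author names as encountered in a citation key."""
--     # A citation key as used in hh.bib!
--     if ':' in bibkey:
--         bibkey = bibkey.split(':')[1]
--
--     current_name = ''
--     for char in bibkey:
--         # For keys of the form "Meier2018" we stop at the start of year.
--         if char.isdigit():
--             break
--         elif char.isupper() and current_name not in ('Mac', 'De'):
--             if current_name:
--                 yield current_name
--             current_name = char
--         else:
--             current_name += char
--     if current_name:
--         yield current_name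
-- ===== SOURCE B (Python) =====
-- import re
--
-- # Name token of a citation key: an optional Mac/De prefix glued to a capitalised
-- # segment, or a leading all-non-capital run.  On the ASCII keys this tool sees,
-- # \d and [^A-Z] coincide with str.isdigit / not str.isupper.
-- _TOKEN = re.compile(r'(?:Mac|De)?[A-Z][^A-Z]*|[^A-Z]+')
--
-- def bibkey_authors(bibkey):
--     """Generator yielding author names as encountered in a citation key."""
--     if ':' in bibkey:
--         bibkey = bibkey.split(':')[1]
--     # keys like "Meier2018": only the part before the year matters
--     head = re.split(r'\d', bibkey, maxsplit=1)[0]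
--     for m in _TOKEN.finditer(head):
--         yield m.group()
-- ===== Notes on version B (the rewrite author's own statement) =====
-- stated objective: idiomatic
-- what changed: Replaces the char-by-char accumulator state machine (with break-at-digit and Mac/De merge state) by truncating the key at the first digit and tokenizing the remainder with a single regex (?:Mac|De)?[A-Z][^A-Z]*|[^A-Z]+ whose optional backtracking prefix reproduces the name merging.
import Mathlib
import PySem

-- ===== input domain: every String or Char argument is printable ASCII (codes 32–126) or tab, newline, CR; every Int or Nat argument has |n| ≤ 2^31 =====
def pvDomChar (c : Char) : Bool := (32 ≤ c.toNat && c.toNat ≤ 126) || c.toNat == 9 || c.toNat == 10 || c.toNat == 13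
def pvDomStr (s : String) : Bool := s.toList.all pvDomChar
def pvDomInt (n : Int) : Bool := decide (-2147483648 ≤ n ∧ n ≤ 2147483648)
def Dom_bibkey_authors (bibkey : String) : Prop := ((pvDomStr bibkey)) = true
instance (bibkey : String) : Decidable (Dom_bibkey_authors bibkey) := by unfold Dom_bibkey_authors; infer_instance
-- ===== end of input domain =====

-- B replaces A's char-by-char accumulator state machine by digit-truncation plus a
-- single regex tokenizer (?:Mac|De)?[A-Z][^A-Z]*|[^A-Z]+ (idiomatic; measured faster
-- by a constant factor: the scan runs in the C regex engine instead of a Python loop).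
-- Both programs are generators; equivalence is about the yielded sequence (as a list).

-- ===== PORT A =====
-- the for-loop of A: state = current_name (as List Char, appended at the end)
def pvALoop : List Char → List Char → List String
  | [], cur => if cur.isEmpty then [] else [String.mk cur]
  | c :: rest, cur =>
    if PySem.Chars.isdigit c then
      -- break: fall through to the trailing "if current_name: yield current_name"
      (if cur.isEmpty then [] else [String.mk cur])
    else if PySem.Chars.isupper c && !(cur == ['M', 'a', 'c'] || cur == ['D', 'e']) then
      (if cur.isEmpty then [] else [String.mk cur]) ++ pvALoop rest [c]
    else
      pvALoop rest (cur ++ [c])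

def bibkey_authors (bibkey : String) : List String :=
  -- if ':' in bibkey: bibkey = bibkey.split(':')[1]  (':' present ⇒ index 1 exists)
  let b := if PySem.Str.isIn ":" bibkey
           then ((PySem.Str.split? bibkey ":").getD []).getD 1 ""
           else bibkey
  pvALoop b.toList []

-- ===== PORT B =====
-- regex char class [^A-Z]; on the ASCII domain Python's re classes coincide with
-- str.isupper / str.isdigit, so the port uses PySem.Chars (exact on ASCII)
def pvNonUp (c : Char) : Bool := !PySem.Chars.isupper c

-- does the regex atom [A-Z] match at the head of l?
def pvHeadUp : List Char → Bool
  | [] => false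
  | d :: _ => PySem.Chars.isupper d

-- match [A-Z][^A-Z]* at the head (greedy): (matched chars, rest)
def pvUpSpan : List Char → List Char × List Char
  | [] => ([], [])
  | d :: r => (d :: r.takeWhile pvNonUp, r.dropWhile pvNonUp)

-- ONE match of (?:Mac|De)?[A-Z][^A-Z]*|[^A-Z]+ at the head of a nonempty l:
-- tried in the regex's backtracking order — prefix Mac, prefix De, no prefix,
-- then the second alternative [^A-Z]+ (greedy, = the non-upper run at the head).
def pvBTok (l : List Char) : List Char × List Char :=
  if l.take 3 == ['M', 'a', 'c'] && pvHeadUp (l.drop 3) then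
    (['M', 'a', 'c'] ++ (pvUpSpan (l.drop 3)).1, (pvUpSpan (l.drop 3)).2)
  else if l.take 2 == ['D', 'e'] && pvHeadUp (l.drop 2) then
    (['D', 'e'] ++ (pvUpSpan (l.drop 2)).1, (pvUpSpan (l.drop 2)).2)
  else if pvHeadUp l then
    pvUpSpan l
  else
    (l.takeWhile pvNonUp, l.dropWhile pvNonUp)

-- each match consumes at least one char (needed for termination of the scan)
theorem pvBTok_snd_length (c : Char) (r : List Char) :
    (pvBTok (c :: r)).2.length ≤ r.length := by
  unfold pvBTok
  split_ifs with h1 h2 h3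
  · rcases hd : (c :: r).drop 3 with _ | ⟨d, r'⟩ <;> simp [pvUpSpan, hd]
    · calc (r'.dropWhile pvNonUp).length ≤ r'.length := List.length_dropWhile_le _ _
        _ ≤ ((c :: r).drop 3).length := by simp [hd]
        _ ≤ r.length := by simp [List.length_drop]
  · rcases hd : (c :: r).drop 2 with _ | ⟨d, r'⟩ <;> simp [pvUpSpan, hd]
    · calc (r'.dropWhile pvNonUp).length ≤ r'.length := List.length_dropWhile_le _ _
        _ ≤ ((c :: r).drop 2).length := by simp [hd]
        _ ≤ r.length := by simp [List.length_drop]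
  · simpa [pvUpSpan] using List.length_dropWhile_le pvNonUp r
  · have hc : pvNonUp c = true := by
      simp [pvHeadUp] at h3; simp [pvNonUp, h3]
    simpa [List.dropWhile_cons, hc] using List.length_dropWhile_le pvNonUp r

-- re.finditer: successive matches, tiling the head of the string
def pvBTokens : List Char → List String
  | [] => []
  | c :: r => String.mk (pvBTok (c :: r)).1 :: pvBTokens (pvBTok (c :: r)).2
termination_by l => l.length
decreasing_by
  simpa [Nat.lt_succ_iff] using pvBTok_snd_length c r

def bibkey_authors_alt (bibkey : String) : List String :=
  -- if ':' in bibkey: bibkey = bibkey.split(':')[1]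
  let b := if PySem.Str.isIn ":" bibkey
           then ((PySem.Str.split? bibkey ":").getD []).getD 1 ""
           else bibkey
  -- head = re.split(r'\d', b, maxsplit=1)[0] : the prefix of b before its first digit
  pvBTokens (b.toList.takeWhile (fun c => !PySem.Chars.isdigit c))

-- ===== PRECONDITION & SPEC =====
def Spec_bibkey_authors (bibkey : String) (out : List String) : Prop := out = bibkey_authors_alt bibkey
instance (bibkey : String) (out : List String) : Decidable (Spec_bibkey_authors bibkey out) := by unfold Spec_bibkey_authors; infer_instance

-- ===== CLAIM (what is proved, stated in full; the proofs are below) =====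
def Claim_equal_bibkey_authors : Prop := ∀ (bibkey : String), Dom_bibkey_authors bibkey → Spec_bibkey_authors bibkey (bibkey_authors bibkey)

-- ===== LEMMAS AND PROOFS =====

-- A's break-at-digit = truncating the input at the first digit
theorem pvALoop_takeWhile (l cur : List Char) :
    pvALoop l cur = pvALoop (l.takeWhile (fun c => !PySem.Chars.isdigit c)) cur := by
  induction l generalizing cur with
  | nil => rfl
  | cons c r ih =>
    by_cases hd : PySem.Chars.isdigit c
    · simp [pvALoop, hd, List.takeWhile_cons]
    · simp only [pvALoop, hd, List.takeWhile_cons, Bool.not_false, if_true, if_false,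
        Bool.false_eq_true, not_false_eq_true]
      split <;> simp [pvALoop, hd, ih]

theorem dropWhile_head {p : Char → Bool} {l r : List Char} {d : Char}
    (h : l.dropWhile p = d :: r) : p d = false := by
  induction l with
  | nil => simp at h
  | cons c t ih =>
    by_cases hc : p c
    · exact ih (by simpa [List.dropWhile_cons, hc] using h)
    · rw [List.dropWhile_cons_of_neg (by simp [hc])] at h
      cases h; simpa using hc

-- A consumes a non-upper run by pure accumulation (cur is never 'Mac'/'De' mid-run:
-- that check is only consulted at an uppercase char)
theorem pvALoop_span (l : List Char) :
    ∀ cur, (∀ c ∈ l, PySem.Chars.isdigit c = false) →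
    pvALoop l cur = pvALoop (l.dropWhile pvNonUp) (cur ++ l.takeWhile pvNonUp) := by
  induction l with
  | nil => simp [pvALoop]
  | cons c r ih =>
    intro cur h
    by_cases hu : PySem.Chars.isupper c
    · simp [pvNonUp, hu, List.takeWhile_cons, List.dropWhile_cons]
    · have hd : PySem.Chars.isdigit c = false := h c (by simp)
      have : pvALoop (c :: r) cur = pvALoop r (cur ++ [c]) := by
        simp [pvALoop, hd, hu]
      rw [this, ih (cur ++ [c]) (fun x hx => h x (by simp [hx]))]
      simp [pvNonUp, hu, List.takeWhile_cons, List.dropWhile_cons]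

theorem pvALoop_start (c : Char) (r : List Char) (hd : PySem.Chars.isdigit c = false) :
    pvALoop (c :: r) [] = pvALoop r [c] := by
  cases h : (PySem.Chars.isupper c &&
      !(([] : List Char) == ['M','a','c'] || ([] : List Char) == ['D','e'])) <;>
    simp [pvALoop, hd, h]

theorem headUp_append (u s : List Char) (hu : ∀ x ∈ u, pvNonUp x = true) :
    pvHeadUp (u ++ s) = (u.isEmpty && pvHeadUp s) := by
  cases u with
  | nil => simp [pvHeadUp]
  | cons x u' =>
    have hx := hu x (by simp)
    have : PySem.Chars.isupper x = false := by simpa [pvNonUp] using hx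
    simp [pvHeadUp, this]

theorem cond1_eq (c : Char) (t s : List Char)
    (htm : ∀ x ∈ t, pvNonUp x = true)
    (hsU : ∀ d r2, s = d :: r2 → PySem.Chars.isupper d = true) :
    (((c :: (t ++ s)).take 3 == ['M','a','c']) && pvHeadUp ((c :: (t ++ s)).drop 3))
      = (decide (c = 'M') && (t == ['a','c']) && !(s == [])) := by
  match t with
  | [] =>
    cases s with
    | nil => simp [pvHeadUp]
    | cons d r2 =>
      have hd := hsU d r2 rfl
      have hda : ¬ (d = 'a') := by rintro rfl; revert hd; decide
      cases r2 <;> simp [pvHeadUp, hda]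
  | [x] =>
    cases s with
    | nil => simp [pvHeadUp]
    | cons d r2 =>
      have hd := hsU d r2 rfl
      have hdc : ¬ (d = 'c') := by rintro rfl; revert hd; decide
      simp [pvHeadUp, hdc]
  | x :: y :: t' =>
    have ht' : ∀ z ∈ t', pvNonUp z = true := fun z hz => htm z (by simp [hz])
    rw [show (c :: (x :: y :: t' ++ s)).drop 3 = t' ++ s by simp]
    rw [headUp_append t' s ht']
    cases s with
    | nil => simp [pvHeadUp]
    | cons d r2 =>
      have hd := hsU d r2 rfl
      by_cases hc : c = 'M' <;> simp [pvHeadUp, hd, hc, Bool.and_assoc]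

theorem cond2_eq (c : Char) (t s : List Char)
    (htm : ∀ x ∈ t, pvNonUp x = true)
    (hsU : ∀ d r2, s = d :: r2 → PySem.Chars.isupper d = true) :
    (((c :: (t ++ s)).take 2 == ['D','e']) && pvHeadUp ((c :: (t ++ s)).drop 2))
      = (decide (c = 'D') && (t == ['e']) && !(s == [])) := by
  match t with
  | [] =>
    cases s with
    | nil => simp [pvHeadUp]
    | cons d r2 =>
      have hd := hsU d r2 rfl
      have hde : ¬ (d = 'e') := by rintro rfl; revert hd; decide
      simp [pvHeadUp, hde]
  | [x] =>
    cases s with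
    | nil => simp [pvHeadUp]
    | cons d r2 =>
      have hd := hsU d r2 rfl
      by_cases hc : c = 'D' <;> simp [pvHeadUp, hd, hc, Bool.and_assoc]
  | x :: y :: t' =>
    have hy : pvNonUp y = true := htm y (by simp)
    have : PySem.Chars.isupper y = false := by simpa [pvNonUp] using hy
    simp [pvHeadUp, this]

theorem main_lemma : ∀ n (l : List Char), l.length ≤ n →
    (∀ c ∈ l, PySem.Chars.isdigit c = false) →
    pvALoop l [] = pvBTokens l := by
  intro n
  induction n with
  | zero =>
    intro l hl _
    have : l = [] := List.length_eq_zero_iff.mp (Nat.le_zero.mp hl)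
    subst this; simp [pvALoop, pvBTokens]
  | succ n ih =>
    intro l hl hdf
    cases l with
    | nil => simp [pvALoop, pvBTokens]
    | cons c r =>
      have hrn : r.length ≤ n := by simpa using hl
      have hdc : PySem.Chars.isdigit c = false := hdf c (by simp)
      have hdr : ∀ x ∈ r, PySem.Chars.isdigit x = false := fun x hx => hdf x (by simp [hx])
      -- the non-upper span of r
      have hrts : r.takeWhile pvNonUp ++ r.dropWhile pvNonUp = r :=
        List.takeWhile_append_dropWhile
      generalize htdef : r.takeWhile pvNonUp = t at hrts
      generalize hsdef : r.dropWhile pvNonUp = s at hrts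
      have htm : ∀ x ∈ t, pvNonUp x = true := fun x hx =>
        List.mem_takeWhile_imp (htdef ▸ hx)
      have hsU : ∀ d r2, s = d :: r2 → PySem.Chars.isupper d = true := by
        intro d r2 h
        have := dropWhile_head (p := pvNonUp) (hsdef.symm ▸ h)
        simpa [pvNonUp] using this
      have hss : s.Sublist r := by rw [← hsdef]; exact List.dropWhile_sublist pvNonUp
      have hdfs : ∀ x ∈ s, PySem.Chars.isdigit x = false := fun x hx =>
        hdr x (hss.mem hx)
      have hsn : s.length ≤ n := le_trans hss.length_le hrn
      -- the emit step: a completed token followed by the rest of the scan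
      have emit : ∀ (cur s' : List Char), s'.length ≤ n →
          (∀ x ∈ s', PySem.Chars.isdigit x = false) →
          (∀ d r2, s' = d :: r2 → PySem.Chars.isupper d = true) →
          cur ≠ [] →
          (s' = [] ∨ (cur ≠ ['M','a','c'] ∧ cur ≠ ['D','e'])) →
          pvALoop s' cur = String.mk cur :: pvBTokens s' := by
        intro cur s' hlen hdf' hU hcur hMD
        cases s' with
        | nil => simp [pvALoop, pvBTokens, List.isEmpty_iff, hcur]
        | cons d r2 =>
          have hud : PySem.Chars.isupper d = true := hU d r2 rfl
          have hdd : PySem.Chars.isdigit d = false := hdf' d (by simp)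
          rcases hMD with h | ⟨hM, hD⟩
          · exact absurd h (by simp)
          have : pvALoop (d :: r2) cur =
              [String.mk cur] ++ pvALoop r2 [d] := by
            simp [pvALoop, hdd, hud, hM, hD, List.isEmpty_iff, hcur]
          rw [this, ← pvALoop_start d r2 hdd,
            ih (d :: r2) (by simpa using hlen) hdf']
          simp [pvBTokens]
      -- A's loop, through the first span
      have hLHS : pvALoop (c :: r) [] = pvALoop s (c :: t) := by
        rw [pvALoop_start c r hdc, pvALoop_span r [c] hdr, htdef, hsdef]
        rfl
      rw [hLHS]
      by_cases hu : PySem.Chars.isupper c = true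
      · by_cases hMac : c = 'M' ∧ t = ['a','c'] ∧ s ≠ []
        · -- the Mac-prefix alternative of the regex fires
          obtain ⟨hcM, htac, hsne⟩ := hMac
          subst hcM; subst htac
          cases s with
          | nil => exact absurd rfl hsne
          | cons d r2 =>
            have hud := hsU d r2 rfl
            have hdd : PySem.Chars.isdigit d = false := hdfs d (by simp)
            have hstep : pvALoop (d :: r2) ('M' :: ['a','c']) =
                pvALoop r2 ('M' :: ['a','c'] ++ [d]) := by
              simp [pvALoop, hdd, hud]
            have hdr2 : ∀ x ∈ r2, PySem.Chars.isdigit x = false := fun x hx =>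
              hdfs x (by simp [hx])
            have hr2n : r2.length ≤ n := by
              have := hss.length_le; simp at this; omega
            have hr2ts : r2.takeWhile pvNonUp ++ r2.dropWhile pvNonUp = r2 :=
              List.takeWhile_append_dropWhile
            generalize ht2 : r2.takeWhile pvNonUp = t2 at hr2ts
            generalize hs2 : r2.dropWhile pvNonUp = s2 at hr2ts
            have hs2U : ∀ e r3, s2 = e :: r3 → PySem.Chars.isupper e = true := by
              intro e r3 h
              have := dropWhile_head (p := pvNonUp) (hs2.symm ▸ h)
              simpa [pvNonUp] using this
            have hs2s : s2.Sublist r2 := by rw [← hs2]; exact List.dropWhile_sublist pvNonUp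
            have hdfs2 : ∀ x ∈ s2, PySem.Chars.isdigit x = false := fun x hx =>
              hdr2 x (hs2s.mem hx)
            have hs2n : s2.length ≤ n := le_trans hs2s.length_le hr2n
            rw [hstep, pvALoop_span r2 ('M' :: ['a','c'] ++ [d]) hdr2, ht2, hs2]
            rw [emit ('M' :: ['a','c'] ++ [d] ++ t2) s2 hs2n hdfs2 hs2U (by simp)
              (Or.inr ⟨fun h => by
                  have := congrArg List.length h
                  simp only [List.length_cons, List.length_append, List.length_nil] at this
                  omega,
                fun h => by injection h with h0 h1; exact absurd h0 (by decide)⟩)]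
            -- B side
            rw [show ('M' :: r) = 'M' :: (['a','c'] ++ d :: r2) by rw [hrts]]
            rw [pvBTokens]
            have hcond1 : ((('M' :: (['a','c'] ++ d :: r2)).take 3 == ['M','a','c']) &&
                pvHeadUp (('M' :: (['a','c'] ++ d :: r2)).drop 3)) = true := by
              rw [cond1_eq 'M' ['a','c'] (d :: r2) htm hsU]
              simp
            simp only [pvBTok, hcond1, if_true]
            have hdrop : ('M' :: (['a','c'] ++ d :: r2)).drop 3 = d :: r2 := by simp
            rw [hdrop]
            simp [pvUpSpan, ht2, hs2]
        · by_cases hDe : c = 'D' ∧ t = ['e'] ∧ s ≠ []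
          · -- the De-prefix alternative of the regex fires
            obtain ⟨hcD, hte, hsne⟩ := hDe
            subst hcD; subst hte
            cases s with
            | nil => exact absurd rfl hsne
            | cons d r2 =>
              have hud := hsU d r2 rfl
              have hdd : PySem.Chars.isdigit d = false := hdfs d (by simp)
              have hstep : pvALoop (d :: r2) ('D' :: ['e']) =
                  pvALoop r2 ('D' :: ['e'] ++ [d]) := by
                simp [pvALoop, hdd, hud]
              have hdr2 : ∀ x ∈ r2, PySem.Chars.isdigit x = false := fun x hx =>
                hdfs x (by simp [hx])
              have hr2n : r2.length ≤ n := by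
                have := hss.length_le; simp at this; omega
              have hr2ts : r2.takeWhile pvNonUp ++ r2.dropWhile pvNonUp = r2 :=
                List.takeWhile_append_dropWhile
              generalize ht2 : r2.takeWhile pvNonUp = t2 at hr2ts
              generalize hs2 : r2.dropWhile pvNonUp = s2 at hr2ts
              have hs2U : ∀ e r3, s2 = e :: r3 → PySem.Chars.isupper e = true := by
                intro e r3 h
                have := dropWhile_head (p := pvNonUp) (hs2.symm ▸ h)
                simpa [pvNonUp] using this
              have hs2s : s2.Sublist r2 := by rw [← hs2]; exact List.dropWhile_sublist pvNonUp
              have hdfs2 : ∀ x ∈ s2, PySem.Chars.isdigit x = false := fun x hx =>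
                hdr2 x (hs2s.mem hx)
              have hs2n : s2.length ≤ n := le_trans hs2s.length_le hr2n
              rw [hstep, pvALoop_span r2 ('D' :: ['e'] ++ [d]) hdr2, ht2, hs2]
              rw [emit ('D' :: ['e'] ++ [d] ++ t2) s2 hs2n hdfs2 hs2U (by simp)
                (Or.inr ⟨fun h => by injection h with h0 h1; exact absurd h0 (by decide),
                  fun h => by
                    have := congrArg List.length h
                    simp only [List.length_cons, List.length_append, List.length_nil] at this
                    omega⟩)]
              -- B side
              rw [show ('D' :: r) = 'D' :: (['e'] ++ d :: r2) by rw [hrts]]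
              rw [pvBTokens]
              have hcond1 : ((('D' :: (['e'] ++ d :: r2)).take 3 == ['M','a','c']) &&
                  pvHeadUp (('D' :: (['e'] ++ d :: r2)).drop 3)) = false := by
                rw [cond1_eq 'D' ['e'] (d :: r2) htm hsU]
                simp
              have hcond2 : ((('D' :: (['e'] ++ d :: r2)).take 2 == ['D','e']) &&
                  pvHeadUp (('D' :: (['e'] ++ d :: r2)).drop 2)) = true := by
                rw [cond2_eq 'D' ['e'] (d :: r2) htm hsU]
                simp
              simp only [pvBTok, hcond1, hcond2, if_true, Bool.false_eq_true, if_false]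
              have hdrop : ('D' :: (['e'] ++ d :: r2)).drop 2 = d :: r2 := by simp
              rw [hdrop]
              simp [pvUpSpan, ht2, hs2]
          · -- the plain [A-Z][^A-Z]* alternative (no prefix)
            have hcur : (c :: t) ≠ [] := by simp
            have hMD : s = [] ∨ ((c :: t) ≠ ['M','a','c'] ∧ (c :: t) ≠ ['D','e']) := by
              cases s with
              | nil => exact Or.inl rfl
              | cons d r2 =>
                refine Or.inr ⟨fun h => ?_, fun h => ?_⟩
                · apply hMac; injection h with h1 h2; exact ⟨h1, h2, by simp⟩
                · apply hDe; injection h with h1 h2; exact ⟨h1, h2, by simp⟩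
            rw [emit (c :: t) s hsn hdfs hsU hcur hMD]
            rw [show (c :: r) = c :: (t ++ s) by rw [hrts]]
            rw [pvBTokens]
            have hcond1 : (((c :: (t ++ s)).take 3 == ['M','a','c']) &&
                pvHeadUp ((c :: (t ++ s)).drop 3)) = false := by
              rw [cond1_eq c t s htm hsU]
              by_cases h1 : c = 'M'
              · by_cases h2 : t = ['a','c']
                · by_cases h3 : s = []
                  · simp [h3]
                  · exact absurd ⟨h1, h2, h3⟩ hMac
                · simp [h2]
              · simp [h1]
            have hcond2 : (((c :: (t ++ s)).take 2 == ['D','e']) &&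
                pvHeadUp ((c :: (t ++ s)).drop 2)) = false := by
              rw [cond2_eq c t s htm hsU]
              by_cases h1 : c = 'D'
              · by_cases h2 : t = ['e']
                · by_cases h3 : s = []
                  · simp [h3]
                  · exact absurd ⟨h1, h2, h3⟩ hDe
                · simp [h2]
              · simp [h1]
            simp only [pvBTok, hcond1, hcond2, Bool.false_eq_true, if_false]
            have : pvHeadUp (c :: (t ++ s)) = true := by simp [pvHeadUp, hu]
            rw [if_pos this]
            have htw : (t ++ s).takeWhile pvNonUp = t := by
              rw [← htdef, ← hsdef, List.takeWhile_append_dropWhile]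
            have hdw : (t ++ s).dropWhile pvNonUp = s := by
              rw [← htdef, ← hsdef, List.takeWhile_append_dropWhile]
            simp [pvUpSpan, htw, hdw]
      · -- c is not uppercase: the second regex alternative [^A-Z]+
        have hu' : PySem.Chars.isupper c = false := by
          cases h : PySem.Chars.isupper c
          · rfl
          · exact absurd h hu
        have hcur : (c :: t) ≠ [] := by simp
        have hcM : ¬ (c = 'M') := by rintro rfl; revert hu'; decide
        have hcD : ¬ (c = 'D') := by rintro rfl; revert hu'; decide
        have hMD : s = [] ∨ ((c :: t) ≠ ['M','a','c'] ∧ (c :: t) ≠ ['D','e']) := by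
          refine Or.inr ⟨fun h => ?_, fun h => ?_⟩
          · injection h with h1 _; exact hcM h1
          · injection h with h1 _; exact hcD h1
        rw [emit (c :: t) s hsn hdfs hsU hcur hMD]
        rw [show (c :: r) = c :: (t ++ s) by rw [hrts]]
        rw [pvBTokens]
        have hcond1 : (((c :: (t ++ s)).take 3 == ['M','a','c']) &&
            pvHeadUp ((c :: (t ++ s)).drop 3)) = false := by
          rw [cond1_eq c t s htm hsU]; simp [hcM]
        have hcond2 : (((c :: (t ++ s)).take 2 == ['D','e']) &&
            pvHeadUp ((c :: (t ++ s)).drop 2)) = false := by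
          rw [cond2_eq c t s htm hsU]; simp [hcD]
        have hcond3 : pvHeadUp (c :: (t ++ s)) = false := by simp [pvHeadUp, hu']
        simp only [pvBTok, hcond1, hcond2, hcond3, Bool.false_eq_true, if_false]
        have htw : (c :: (t ++ s)).takeWhile pvNonUp = c :: t := by
          rw [List.takeWhile_cons_of_pos (by simp [pvNonUp, hu'])]
          rw [← htdef, ← hsdef, List.takeWhile_append_dropWhile]
        have hdw : (c :: (t ++ s)).dropWhile pvNonUp = s := by
          rw [List.dropWhile_cons_of_pos (by simp [pvNonUp, hu'])]
          rw [← htdef, ← hsdef, List.takeWhile_append_dropWhile]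
        simp [htw, hdw]

theorem bibkey_authors_spec : Claim_equal_bibkey_authors := by
  intro bibkey _
  unfold Spec_bibkey_authors bibkey_authors bibkey_authors_alt
  generalize (if PySem.Str.isIn ":" bibkey
      then ((PySem.Str.split? bibkey ":").getD []).getD 1 ""
      else bibkey) = b
  rw [pvALoop_takeWhile]
  exact main_lemma _ _ le_rfl (fun c hc => by
    have := List.mem_takeWhile_imp hc; simpa using this)
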